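-- pv_equiv track=rewrite | github.com/sun-hainan/Python | 40_外部内存算法/external_scan.py | prefetch_scan
-- ===== SOURCE A (Python) =====
-- def prefetch_scan(data, block_size, prefetch_distance=2):
--
--     """
--
--     预取优化：提前加载下一个块。
--
--
--
--     参数:
--
--         data: 数据数组
--
--         block_size: 块大小
--
--         prefetch_distance: 预取距离（提前多少块）
--
--
--
--     返回:
--
--         实际 I/O 次数（考虑预取）
--
--     """
--
--     n = len(data)
--
--     num_blocks = (n + block_size - 1) // block_size
--
--     io_count = 0
--
--     prefetched = set()
--
--
--
--     for i in range(n):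
--
--         block_id = i // block_size
--
--
--
--         if block_id not in prefetched:
--
--             # 需要加载这个块
--
--             io_count += 1
--
--             # 预取后续块
--
--             for d in range(1, prefetch_distance + 1):
--
--                 next_block = block_id + d
--
--                 if next_block < num_blocks:
--
--                     prefetched.add(next_block)
--
--
--
--     return io_count
-- ===== SOURCE B (Python) =====
-- def prefetch_scan(data, block_size, prefetch_distance=2):
--     # O(1) closed form. A block causes I/O iff its index is a multiple of
--     # step = prefetch_distance + 1 (or every block if prefetch_distance <= 0),
--     # and A charges one I/O per *element* of such a block, so the answer is
--     # (number of miss blocks) * block_size, corrected when the last block is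
--     # a partial miss block.
--     n = len(data)
--     num_blocks = (n + block_size - 1) // block_size
--     step = prefetch_distance + 1 if prefetch_distance > 0 else 1
--     misses = (num_blocks + step - 1) // step
--     io = misses * block_size
--     if num_blocks > 0 and (num_blocks - 1) % step == 0 and n % block_size != 0:
--         io -= block_size - n % block_size
--     return io
-- ===== Notes on version B (the rewrite author's own statement) =====
-- stated objective: faster
-- what changed: Replaced the per-element loop with a per-set simulation by an O(1) closed form: miss blocks are exactly the block indices divisible by prefetch_distance+1, each charged one I/O per element, so the count is ceil(num_blocks/step)*block_size minus a correction when the last (partial) block is a miss block.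
-- outside the precondition, e.g. on prefetch_scan([1, 2, 3], -2, 2): A returns 3, B returns 0
import Mathlib
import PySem

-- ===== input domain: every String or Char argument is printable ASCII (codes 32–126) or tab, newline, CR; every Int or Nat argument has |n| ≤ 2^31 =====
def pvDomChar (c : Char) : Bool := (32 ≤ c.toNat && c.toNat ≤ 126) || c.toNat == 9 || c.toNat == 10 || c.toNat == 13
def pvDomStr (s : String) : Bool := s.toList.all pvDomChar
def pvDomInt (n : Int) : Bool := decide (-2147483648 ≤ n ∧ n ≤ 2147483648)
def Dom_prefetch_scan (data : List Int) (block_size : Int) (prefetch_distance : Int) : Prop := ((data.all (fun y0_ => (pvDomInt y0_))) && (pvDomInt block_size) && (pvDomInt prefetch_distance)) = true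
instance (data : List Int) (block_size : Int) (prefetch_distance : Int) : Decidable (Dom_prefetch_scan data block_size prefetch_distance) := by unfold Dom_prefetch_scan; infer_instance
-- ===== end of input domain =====

-- B replaces A's per-element simulation with an O(1) closed form (miss blocks are the
-- block indices divisible by prefetch_distance+1, charged one I/O per element).

-- ===== PORT A =====
def prefetch_scan (data : List Int) (block_size : Int) (prefetch_distance : Int) : Int :=
  let n : Int := PySem.List.len data
  let num_blocks : Int := PySem.Int.floordiv (n + block_size - 1) block_size
  let st : Int × PySem.Set Int :=
    (PySem.List.pyRange 0 n 1).foldl (fun st i =>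
      let block_id := PySem.Int.floordiv i block_size
      if !(PySem.Set.contains st.2 block_id) then
        (st.1 + 1,
         (PySem.List.pyRange 1 (prefetch_distance + 1) 1).foldl (fun pf d =>
           let next_block := block_id + d
           if next_block < num_blocks then PySem.Set.add pf next_block else pf) st.2)
      else st) (0, PySem.Set.empty)
  st.1

-- ===== PORT B =====
def prefetch_scan_alt (data : List Int) (block_size : Int) (prefetch_distance : Int) : Int :=
  let n : Int := PySem.List.len data
  let num_blocks : Int := PySem.Int.floordiv (n + block_size - 1) block_size
  let step : Int := if prefetch_distance > 0 then prefetch_distance + 1 else 1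
  let misses : Int := PySem.Int.floordiv (num_blocks + step - 1) step
  let io : Int := misses * block_size
  if num_blocks > 0 ∧ PySem.Int.mod (num_blocks - 1) step = 0 ∧ PySem.Int.mod n block_size ≠ 0 then
    io - (block_size - PySem.Int.mod n block_size)
  else io

-- ===== PRECONDITION & SPEC =====
-- Pre_ requires block_size ≥ 1: block_size = 0 makes A raise ZeroDivisionError, and a
-- negative block_size is outside the natural domain (a block size is positive) — there
-- A's value is an accident of Python's floor division by a negative divisor.
def Pre_prefetch_scan (data : List Int) (block_size : Int) (prefetch_distance : Int) : Prop :=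
  1 ≤ block_size
instance (data : List Int) (block_size : Int) (prefetch_distance : Int) : Decidable (Pre_prefetch_scan data block_size prefetch_distance) := by unfold Pre_prefetch_scan; infer_instance
def pvWitness_prefetch_scan : List Int × Int × Int := ([1, 2, 3, 4, 5], 2, 2)

def Spec_prefetch_scan (data : List Int) (block_size : Int) (prefetch_distance : Int) (out : Int) : Prop := out = prefetch_scan_alt data block_size prefetch_distance
instance (data : List Int) (block_size : Int) (prefetch_distance : Int) (out : Int) : Decidable (Spec_prefetch_scan data block_size prefetch_distance out) := by unfold Spec_prefetch_scan; infer_instance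

-- ===== CLAIM (what is proved, stated in full; the proofs are below) =====
def Claim_equal_prefetch_scan : Prop := ∀ (data : List Int) (block_size : Int) (prefetch_distance : Int), Dom_prefetch_scan data block_size prefetch_distance → Pre_prefetch_scan data block_size prefetch_distance → Spec_prefetch_scan data block_size prefetch_distance (prefetch_scan data block_size prefetch_distance)

-- ===== LEMMAS AND PROOFS =====

-- Abstract step function of A's loop (floor division replaced by ediv, valid for bs > 0,
-- and the inner range written with s = step = max(prefetch_distance,0)+1).
def pvStep (bs s nb : Int) (st : Int × PySem.Set Int) (i : Int) : Int × PySem.Set Int :=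
  let c := i / bs
  if !(PySem.Set.contains st.2 c) then
    (st.1 + 1,
     (PySem.List.pyRange 1 s 1).foldl (fun pf d =>
       if c + d < nb then PySem.Set.add pf (c + d) else pf) st.2)
  else st

-- io_count after k iterations of A's loop
def pvCnt (bs s : Int) : Nat → Int
  | 0 => 0
  | k+1 => pvCnt bs s k + (if ((k : Int) / bs) % s = 0 then 1 else 0)

-- membership of the prefetched set after k iterations
def pvMem (bs s nb : Int) (k : Nat) (b : Int) : Prop :=
  1 ≤ k ∧ 1 ≤ b ∧ b < nb ∧ b % s ≠ 0 ∧ b ≤ ((((k : Int) - 1) / bs) / s) * s + (s - 1)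

-- closed form: n = bs*q + r ⇒ io = bs * ceil(q/s) + (r if q % s = 0 else 0)
def pvD (bs s q r : Int) : Int := bs * ((q + s - 1) / s) + (if q % s = 0 then r else 0)

theorem pv_divmod {b q r : Int} (a : Int) (hb : 0 < b) (hr : 0 ≤ r) (hr2 : r < b)
    (h : a = b * q + r) : a / b = q ∧ a % b = r := by
  have h1 : a = r + b * q := by omega
  constructor
  · rw [h1, Int.add_mul_ediv_left r q (by omega : b ≠ 0), Int.ediv_eq_zero_of_lt hr hr2]; ring
  · rw [h1, Int.add_mul_emod_self_left, Int.emod_eq_of_lt hr hr2]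

theorem pv_sub_one_div_of_eq {s q : Int} (hs : 0 < s) (h : q % s = 0) :
    (q - 1) / s = q / s - 1 := by
  have hq := Int.ediv_add_emod q s
  have hm : s * (q / s - 1) = s * (q / s) - s := by ring
  exact (pv_divmod (q - 1) hs (by omega) (by omega) (by omega : q - 1 = s * (q / s - 1) + (s - 1))).1
theorem pv_sub_one_div_of_ne {s q : Int} (hs : 0 < s) (h : q % s ≠ 0) :
    (q - 1) / s = q / s := by
  have hq := Int.ediv_add_emod q s
  have h0 : 0 ≤ q % s := Int.emod_nonneg q (by omega)
  have h1 : q % s < s := Int.emod_lt_of_pos q hs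
  exact (pv_divmod (q - 1) hs (by omega) (by omega) (by omega : q - 1 = s * (q / s) + (q % s - 1))).1

-- membership through the conditional-add inner loop
theorem pv_mem_fold (l : List Int) (s0 : PySem.Set Int) (c nb y : Int) :
    (y ∈ l.foldl (fun pf d => if c + d < nb then PySem.Set.add pf (c + d) else pf) s0) ↔
      y ∈ s0 ∨ ∃ d ∈ l, c + d < nb ∧ y = c + d := by
  induction l generalizing s0 with
  | nil => simp
  | cons x l ih =>
    simp only [List.foldl_cons, ih, List.mem_cons]
    split_ifs with h
    · rw [PySem.Set.mem_add]
      constructor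
      · rintro (⟨hy | hy⟩ | ⟨d, hd, h2, h3⟩)
        · exact Or.inl hy
        · exact Or.inr ⟨x, Or.inl rfl, h, hy⟩
        · exact Or.inr ⟨d, Or.inr hd, h2, h3⟩
      · rintro (hy | ⟨d, (rfl | hd), h2, h3⟩)
        · exact Or.inl (Or.inl hy)
        · exact Or.inl (Or.inr h3)
        · exact Or.inr ⟨d, hd, h2, h3⟩
    · constructor
      · rintro (hy | ⟨d, hd, h2, h3⟩)
        · exact Or.inl hy
        · exact Or.inr ⟨d, Or.inr hd, h2, h3⟩
      · rintro (hy | ⟨d, (rfl | hd), h2, h3⟩)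
        · exact Or.inl hy
        · exact absurd h2 h
        · exact Or.inr ⟨d, hd, h2, h3⟩

-- the main loop invariant
theorem pv_inv (bs s nb : Int) (hbs : 0 < bs) (hs : 0 < s)
    (n : Nat) (hnb : ∀ k : Nat, k < n → (k : Int) / bs < nb) :
    ∀ k : Nat, k ≤ n →
      ((PySem.List.pyRange 0 (k : Int) 1).foldl (pvStep bs s nb) (0, PySem.Set.empty)).1
        = pvCnt bs s k ∧
      ∀ b : Int, b ∈ ((PySem.List.pyRange 0 (k : Int) 1).foldl (pvStep bs s nb) (0, PySem.Set.empty)).2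
        ↔ pvMem bs s nb k b := by
  intro k
  induction k with
  | zero =>
    intro _
    rw [PySem.List.pyRange_one_eq_nil (by norm_num)]
    constructor
    · rfl
    · intro b; simp [pvMem, PySem.Set.empty]
  | succ k ih =>
    intro hk
    have ih := ih (by omega)
    have hsplit : PySem.List.pyRange 0 ((k : Nat) + 1 : Int) 1
        = PySem.List.pyRange 0 (k : Int) 1 ++ [(k : Int)] := by
      exact PySem.List.pyRange_one_succ_right (a := 0) (b := (k : Int)) (by positivity)
    have hcast : ((k + 1 : Nat) : Int) = ((k : Nat) + 1 : Int) := by push_cast; ring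
    rw [hcast, hsplit, List.foldl_append, List.foldl_cons, List.foldl_nil]
    set st := (PySem.List.pyRange 0 (k : Int) 1).foldl (pvStep bs s nb) (0, PySem.Set.empty) with hst
    obtain ⟨ihc, ihm⟩ := ih
    -- abbreviations
    set c' : Int := (k : Int) / bs with hc'
    have hc'0 : 0 ≤ c' := Int.ediv_nonneg (by positivity) (by omega)
    have hc'nb : c' < nb := hnb k (by omega)
    have hmono : ((k : Int) - 1) / bs ≤ c' := Int.ediv_le_ediv hbs (by omega)
    have hmono2 : c' ≤ ((k : Int) - 1) / bs + 1 := by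
      have h2 : ((k : Int) - 1 + 1 * bs) / bs = ((k : Int) - 1) / bs + 1 :=
        Int.add_mul_ediv_right _ _ (by omega)
      calc c' ≤ ((k : Int) - 1 + 1 * bs) / bs := Int.ediv_le_ediv hbs (by omega)
        _ = _ := h2
    have hcontains : (PySem.Set.contains st.2 c' = true) ↔ pvMem bs s nb k c' := by
      rw [PySem.Set.contains_iff]; exact ihm c'
    by_cases hmem : pvMem bs s nb k c'
    · -- already prefetched: no I/O, set unchanged
      have hcb : PySem.Set.contains st.2 c' = true := hcontains.mpr hmem
      simp only [pvStep]
      rw [← hc']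
      simp only [hcb, Bool.not_true]
      rw [if_neg (show ¬(false = true) by simp)]
      obtain ⟨hk1, hb1, hbnb, hbmod, hble⟩ := hmem
      constructor
      · rw [ihc, pvCnt, ← hc', if_neg hbmod, add_zero]
      · intro b
        rw [ihm b]
        -- the bound is unchanged: (c'/s)*s = (((k-1)/bs)/s)*s
        have hbound : (c' / s) * s = ((((k : Int) - 1) / bs) / s) * s := by
          rcases (by omega : c' = ((k : Int) - 1) / bs ∨ c' = ((k : Int) - 1) / bs + 1) with h | h
          · rw [h]
          · have : (c' - 1) / s = c' / s := pv_sub_one_div_of_ne hs hbmod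
            rw [h] at this ⊢
            rw [show ((k : Int) - 1) / bs + 1 - 1 = ((k : Int) - 1) / bs by ring] at this
            rw [this]
        unfold pvMem
        rw [show (((k + 1 : Nat)) : Int) - 1 = (k : Int) by push_cast; ring, ← hc']
        have hq := Int.ediv_add_emod (((k : Int) - 1) / bs) s
        constructor
        · rintro ⟨h1, h2, h3, h4, h5⟩; exact ⟨by omega, h2, h3, h4, by omega⟩
        · rintro ⟨h1, h2, h3, h4, h5⟩
          refine ⟨?_, h2, h3, h4, by omega⟩
          exact hk1
    · -- miss: one I/O, prefetch the next blocks
      have hcb : PySem.Set.contains st.2 c' = false := by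
        cases h : PySem.Set.contains st.2 c'
        · rfl
        · exact absurd (hcontains.mp h) hmem
      simp only [pvStep]
      rw [← hc']
      simp only [hcb, Bool.not_false]
      rw [if_pos trivial]
      -- from ¬pvMem derive c' % s = 0
      have hL := Int.ediv_add_emod (((k : Int) - 1) / bs) s
      have hL0 : 0 ≤ (((k : Int) - 1) / bs) % s := Int.emod_nonneg _ (by omega)
      have hL1 : (((k : Int) - 1) / bs) % s < s := Int.emod_lt_of_pos _ hs
      have hcs : c' % s = 0 := by
        by_cases hk0 : k = 0
        · subst hk0
          have : c' = 0 := by rw [hc']; norm_num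
          rw [this]; exact Int.zero_emod s
        · by_cases hz : c' = 0
          · rw [hz]; exact Int.zero_emod s
          · by_cases hm : c' % s = 0
            · exact hm
            · -- then the bound must fail, forcing c' = multiple of s — contradiction path
              exfalso
              apply hmem
              refine ⟨by omega, by omega, hc'nb, hm, ?_⟩
              -- c' ≤ L + s - 1 where L = s * (((k-1)/bs)/s): else c' ≡ 0 (mod s)
              by_contra hgt
              push_neg at hgt
              have hm2 : ((((k : Int) - 1) / bs) / s + 1) * s
                  = s * ((((k : Int) - 1) / bs) / s) + s := by ring
              have hm3 : ((((k : Int) - 1) / bs) / s) * s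
                  = s * ((((k : Int) - 1) / bs) / s) := by ring
              have hc'eq : c' = ((k : Int) - 1) / bs + 1 := by omega
              have : c' = ((((k : Int) - 1) / bs) / s + 1) * s := by omega
              rw [this] at hm
              exact hm (Int.mul_emod_left _ _)
      constructor
      · rw [ihc, pvCnt, ← hc', if_pos hcs]
      · intro b
        rw [pv_mem_fold, ihm b]
        have hrange : ∀ d : Int, d ∈ PySem.List.pyRange 1 s 1 ↔ 1 ≤ d ∧ d < s :=
          fun d => PySem.List.mem_pyRange_one
        have hcdiv : (c' / s) * s = c' := by
          have h1 := Int.ediv_add_emod c' s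
          have h2 : (c' / s) * s = s * (c' / s) := by ring
          omega
        unfold pvMem
        rw [show (((k + 1 : Nat)) : Int) - 1 = (k : Int) by push_cast; ring, ← hc']
        constructor
        · rintro (⟨h1, h2, h3, h4, h5⟩ | ⟨d, hd, hlt, rfl⟩)
          · -- old members stay: old bound ≤ new bound
            have hm3 : ((((k : Int) - 1) / bs) / s) * s
                = s * ((((k : Int) - 1) / bs) / s) := by ring
            have hLle : ((((k : Int) - 1) / bs) / s) * s ≤ ((k : Int) - 1) / bs := by omega
            exact ⟨by omega, h2, h3, h4, by omega⟩
          · rw [hrange d] at hd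
            refine ⟨by omega, by omega, hlt, ?_, by omega⟩
            have h1 := Int.ediv_add_emod c' s
            have : c' + d = d + s * (c' / s) := by omega
            rw [this, Int.add_mul_emod_self_left, Int.emod_eq_of_lt (by omega) (by omega)]
            omega
        · rintro ⟨h1, h2, h3, h4, h5⟩
          by_cases hy : c' < b
          · exact Or.inr ⟨b - c', (hrange _).mpr (by omega), by omega, by ring⟩
          · -- b ≤ c'; b ≠ c' since b % s ≠ 0 = c' % s
            push_neg at hy
            have hbne : b ≠ c' := fun h => h4 (h ▸ hcs)
            have hk0 : k ≠ 0 := by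
              rintro rfl
              have : c' = 0 := by rw [hc']; norm_num
              omega
            refine Or.inl ⟨by omega, h2, h3, h4, ?_⟩
            rcases (by omega : c' = ((k : Int) - 1) / bs ∨ c' = ((k : Int) - 1) / bs + 1) with h | h
            · have : (((k : Int) - 1) / bs) / s * s = c' := by rw [← h]; exact hcdiv
              omega
            · have hd1 : (c' - 1) / s = c' / s - 1 := pv_sub_one_div_of_eq hs hcs
              have h9 : ((k : Int) - 1) / bs = c' - 1 := by omega
              rw [h9, hd1]
              have h10 : (c' / s - 1) * s = (c' / s) * s - s := by ring
              omega

-- A's loop step equals the abstract step for bs > 0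
theorem pv_step_eq (bs pd nb : Int) (hbs : 0 < bs) :
    (fun (st : Int × PySem.Set Int) (i : Int) =>
      let block_id := PySem.Int.floordiv i bs
      if !(PySem.Set.contains st.2 block_id) then
        (st.1 + 1,
         (PySem.List.pyRange 1 (pd + 1) 1).foldl (fun pf d =>
           let next_block := block_id + d
           if next_block < nb then PySem.Set.add pf next_block else pf) st.2)
      else st)
    = pvStep bs (if pd > 0 then pd + 1 else 1) nb := by
  funext st i
  simp only [pvStep, PySem.Int.floordiv_eq_ediv_of_pos hbs]
  by_cases hpd : pd > 0
  · simp [hpd]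
  · have h1 : PySem.List.pyRange 1 (pd + 1) 1 = [] :=
      PySem.List.pyRange_one_eq_nil (by omega)
    have h2 : PySem.List.pyRange 1 (if pd > 0 then pd + 1 else 1) 1 = [] := by
      rw [if_neg hpd]; exact PySem.List.pyRange_one_eq_nil (by omega)
    simp [h1, h2]

-- each visited block index is below num_blocks
theorem pv_lt_nb (bs : Int) (hbs : 0 < bs) (n : Nat) :
    ∀ k : Nat, k < n → (k : Int) / bs < ((n : Int) + bs - 1) / bs := by
  intro k hk
  have hkn : (k : Int) ≤ (n : Int) - 1 := by omega
  have h1 : (k : Int) / bs ≤ ((n : Int) - 1) / bs := Int.ediv_le_ediv hbs hkn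
  have h2 : ((n : Int) + bs - 1) / bs = ((n : Int) - 1) / bs + 1 := by
    rw [show ((n : Int) + bs - 1) = ((n : Int) - 1 + 1 * bs) by ring]
    exact Int.add_mul_ediv_right _ _ (by omega)
  omega

-- A computes pvCnt
theorem pv_portA (data : List Int) (bs pd : Int) (hbs : 0 < bs) :
    prefetch_scan data bs pd
      = pvCnt bs (if pd > 0 then pd + 1 else 1) data.length := by
  unfold prefetch_scan
  have hlen : PySem.List.len data = (data.length : Int) := PySem.List.len_eq data
  have hnb : PySem.Int.floordiv ((data.length : Int) + bs - 1) bs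
      = ((data.length : Int) + bs - 1) / bs := PySem.Int.floordiv_eq_ediv_of_pos hbs
  simp only [hlen, pv_step_eq bs pd _ hbs, hnb]
  have hs : 0 < (if pd > 0 then pd + 1 else 1) := by split <;> omega
  exact (pv_inv bs _ _ hbs hs data.length (pv_lt_nb bs hbs data.length)
    data.length le_rfl).1

-- pvCnt equals the closed form pvD
theorem pv_cnt_closed (bs s : Int) (hbs : 0 < bs) (hs : 0 < s) (n : Nat) :
    pvCnt bs s n = pvD bs s ((n : Int) / bs) ((n : Int) % bs) := by
  induction n with
  | zero =>
    have h0 : ((0 : Nat) : Int) = 0 := rfl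
    simp only [pvCnt, pvD, h0, Int.zero_ediv, Int.zero_emod]
    rw [Int.ediv_eq_zero_of_lt (by omega) (by omega)]
    simp
  | succ n ih =>
    have hcast : ((n + 1 : Nat) : Int) = (n : Int) + 1 := by push_cast; ring
    rw [pvCnt, ih, hcast]
    set q := (n : Int) / bs with hq
    set r := (n : Int) % bs with hr
    have hqr : bs * q + r = (n : Int) := Int.ediv_add_emod _ _
    have hr0 : 0 ≤ r := Int.emod_nonneg _ (by omega)
    have hr1 : r < bs := Int.emod_lt_of_pos _ hbs
    by_cases hcase : r + 1 < bs
    · have hd := pv_divmod ((n : Int) + 1) hbs (by omega) hcase (by omega : (n : Int) + 1 = bs * q + (r + 1))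
      rw [hd.1, hd.2]
      unfold pvD
      split_ifs <;> omega
    · have hmul : bs * (q + 1) = bs * q + bs := by ring
      have hd := pv_divmod ((n : Int) + 1) hbs le_rfl hbs
        (by omega : (n : Int) + 1 = bs * (q + 1) + 0)
      rw [hd.1, hd.2]
      unfold pvD
      have e1 : (q + 1 + s - 1) / s = q / s + 1 := by
        rw [show q + 1 + s - 1 = q + 1 * s by ring, Int.add_mul_ediv_right _ _ (by omega)]
      rw [e1]
      have hlink : bs * (q / s + 1) = bs * (q / s) + bs := by ring
      by_cases h : q % s = 0
      · have e2 : (q + s - 1) / s = q / s := by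
          rw [show q + s - 1 = (q - 1) + 1 * s by ring,
            Int.add_mul_ediv_right _ _ (by omega), pv_sub_one_div_of_eq hs h]
          ring
        rw [e2]
        split_ifs <;> omega
      · have e2 : (q + s - 1) / s = q / s + 1 := by
          rw [show q + s - 1 = (q - 1) + 1 * s by ring,
            Int.add_mul_ediv_right _ _ (by omega), pv_sub_one_div_of_ne hs h]
        rw [e2]
        split_ifs <;> omega

-- B computes the closed form pvD
theorem pv_portB (data : List Int) (bs pd : Int) (hbs : 0 < bs) :
    prefetch_scan_alt data bs pd
      = pvD bs (if pd > 0 then pd + 1 else 1)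
          ((data.length : Int) / bs) ((data.length : Int) % bs) := by
  unfold prefetch_scan_alt
  have hlen : PySem.List.len data = (data.length : Int) := PySem.List.len_eq data
  set s : Int := if pd > 0 then pd + 1 else 1 with hsdef
  have hs : 0 < s := by rw [hsdef]; split <;> omega
  set n : Int := (data.length : Int) with hn
  set q := n / bs with hq
  set r := n % bs with hr
  have hqr : bs * q + r = n := Int.ediv_add_emod _ _
  have hr0 : 0 ≤ r := Int.emod_nonneg _ (by omega)
  have hr1 : r < bs := Int.emod_lt_of_pos _ hbs
  have hq0 : 0 ≤ q := Int.ediv_nonneg (by positivity) (by omega)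
  have hmodn : PySem.Int.mod n bs = r := by rw [PySem.Int.mod_eq_emod_of_pos hbs]
  have hmul : bs * (q + 1) = bs * q + bs := by ring
  have hnb : PySem.Int.floordiv (n + bs - 1) bs = q + (if r = 0 then 0 else 1) := by
    rw [PySem.Int.floordiv_eq_ediv_of_pos hbs]
    split_ifs with h
    · have := (pv_divmod (q := q) (r := bs - 1) (n + bs - 1) hbs (by omega) (by omega)
        (by omega)).1
      omega
    · have := (pv_divmod (q := q + 1) (r := r - 1) (n + bs - 1) hbs (by omega) (by omega)
        (by omega)).1
      omega
  simp only [hlen, hmodn, hnb]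
  by_cases hrz : r = 0
  · -- no partial block; the correction branch cannot fire
    simp only [hrz, reduceIte, add_zero]
    have hmiss : PySem.Int.floordiv (q + s - 1) s = (q + s - 1) / s := by
      rw [PySem.Int.floordiv_eq_ediv_of_pos hs]
    rw [hmiss, if_neg (by simp)]
    unfold pvD
    split_ifs <;> ring_nf
  · simp only [if_neg hrz]
    have hmiss : PySem.Int.floordiv (q + 1 + s - 1) s = q / s + 1 := by
      rw [PySem.Int.floordiv_eq_ediv_of_pos hs,
        show q + 1 + s - 1 = q + 1 * s by ring, Int.add_mul_ediv_right _ _ (by omega)]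
    have hm1 : PySem.Int.mod (q + 1 - 1) s = q % s := by
      rw [PySem.Int.mod_eq_emod_of_pos hs]; norm_num
    rw [hmiss, hm1]
    unfold pvD
    by_cases h : q % s = 0
    · rw [if_pos (by refine ⟨by omega, h, hrz⟩), if_pos h]
      have e2 : (q + s - 1) / s = q / s := by
        rw [show q + s - 1 = (q - 1) + 1 * s by ring,
          Int.add_mul_ediv_right _ _ (by omega), pv_sub_one_div_of_eq hs h]
        ring
      rw [e2]; ring
    · rw [if_neg (by rintro ⟨-, h2, -⟩; exact h h2), if_neg h]
      have e2 : (q + s - 1) / s = q / s + 1 := by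
        rw [show q + s - 1 = (q - 1) + 1 * s by ring,
          Int.add_mul_ediv_right _ _ (by omega), pv_sub_one_div_of_ne hs h]
      rw [e2]; ring

-- ===== VERDICT (by name: the statement is the Claim_ definition above) =====
theorem prefetch_scan_spec : Claim_equal_prefetch_scan := by
  intro data bs pd _ hpre
  have hbs : 0 < bs := hpre
  unfold Spec_prefetch_scan
  rw [pv_portA data bs pd hbs, pv_portB data bs pd hbs,
    pv_cnt_closed bs _ hbs (by split <;> omega) data.length]
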